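-- pv_equiv track=rewrite | github.com/BrainStOrmics/Thermogensis_Analyses | 4.TMEM41B_Phylo/20.N_term.stat.py | find_kth_non_dash
-- ===== SOURCE A (Python) =====
-- def find_kth_non_dash(s, k):
--     if k == -1:
--         return -1
--     count = 0  # To count non '-' characters
--     for index, char in enumerate(s):
--         if char != '-':
--             count += 1
--             if count == k:
--                 return index  # Return the index of the k-th non '-' character
--     return -1  # Return -1 if k is greater than the number of non '-' characters
-- ===== SOURCE B (Python) =====
-- def find_kth_non_dash(s, k):
--     positions = [i for i, c in enumerate(s) if c != '-']
--     return positions[k - 1] if 1 <= k <= len(positions) else -1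
-- ===== Notes on version B (the rewrite author's own statement) =====
-- stated objective: simpler
-- what changed: Replaces the early-exiting counting loop with a build-the-index-list-then-lookup decomposition: collect all non-dash positions, then index positions[k-1] under a strict 1 <= k <= len bound.
import Mathlib
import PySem

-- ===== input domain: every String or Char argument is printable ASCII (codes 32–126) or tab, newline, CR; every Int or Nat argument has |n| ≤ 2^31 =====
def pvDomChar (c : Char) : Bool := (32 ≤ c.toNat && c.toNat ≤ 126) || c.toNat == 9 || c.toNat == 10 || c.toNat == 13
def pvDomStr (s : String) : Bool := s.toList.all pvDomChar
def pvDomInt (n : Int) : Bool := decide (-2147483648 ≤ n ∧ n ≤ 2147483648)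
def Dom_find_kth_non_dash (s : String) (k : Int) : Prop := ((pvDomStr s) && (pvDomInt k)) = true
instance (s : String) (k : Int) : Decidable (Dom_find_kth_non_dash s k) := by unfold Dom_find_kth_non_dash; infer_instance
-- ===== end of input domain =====

-- B builds the list of non-dash positions once and indexes it, instead of A's counting scan with early exit; objective: simpler.

-- ===== PORT A =====
-- the for-loop over enumerate(s): idx is the running index, count the running non-dash count
def findKthLoop : List Char → Int → Int → Int → Int
  | [], _, _, _ => -1
  | c :: rest, idx, count, k =>
    if c ≠ '-' then
      if count + 1 = k then idx
      else findKthLoop rest (idx + 1) (count + 1) k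
    else findKthLoop rest (idx + 1) count k

def find_kth_non_dash (s : String) (k : Int) : Int :=
  if k = -1 then -1
  else findKthLoop s.toList 0 0 k

-- ===== PORT B =====
def find_kth_non_dash_alt (s : String) (k : Int) : Int :=
  let positions : List Int :=
    (PySem.List.enumerate s.toList 0).filterMap (fun p => if p.2 ≠ '-' then some p.1 else none)
  if 1 ≤ k ∧ k ≤ (positions.length : Int) then positions.getD (k - 1).toNat (-1) else -1

-- ===== PRECONDITION & SPEC =====
def Spec_find_kth_non_dash (s : String) (k : Int) (out : Int) : Prop := out = find_kth_non_dash_alt s k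
instance (s : String) (k : Int) (out : Int) : Decidable (Spec_find_kth_non_dash s k out) := by unfold Spec_find_kth_non_dash; infer_instance

-- ===== CLAIM (what is proved, stated in full; the proofs are below) =====
def Claim_equal_find_kth_non_dash : Prop := ∀ (s : String) (k : Int), Dom_find_kth_non_dash s k → Spec_find_kth_non_dash s k (find_kth_non_dash s k)

-- ===== LEMMAS AND PROOFS =====

-- the non-dash positions of l, indices starting at off
def pvPos : List Char → Int → List Int
  | [], _ => []
  | c :: rest, off => if c ≠ '-' then off :: pvPos rest (off + 1) else pvPos rest (off + 1)

theorem pvPos_eq_filterMap (l : List Char) (off : Int) :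
    (PySem.List.enumerate l off).filterMap (fun p => if p.2 ≠ '-' then some p.1 else none)
      = pvPos l off := by
  induction l generalizing off with
  | nil => simp [PySem.List.enumerate_nil, pvPos]
  | cons c rest ih =>
    rw [PySem.List.enumerate_cons, List.filterMap_cons]
    by_cases h : c = '-'
    · simpa [pvPos, h] using ih (off + 1)
    · simpa [pvPos, h] using ih (off + 1)

theorem findKthLoop_eq (l : List Char) (idx count k : Int) :
    findKthLoop l idx count k =
      (if 1 ≤ k - count ∧ k - count ≤ ((pvPos l idx).length : Int)
       then (pvPos l idx).getD (k - count - 1).toNat (-1) else -1) := by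
  induction l generalizing idx count with
  | nil => simp [findKthLoop, pvPos]
  | cons c rest ih =>
    by_cases hc : c = '-'
    · have h1 : findKthLoop (c :: rest) idx count k = findKthLoop rest (idx + 1) count k := by
        simp [findKthLoop, hc]
      have h2 : pvPos (c :: rest) idx = pvPos rest (idx + 1) := by simp [pvPos, hc]
      rw [h1, h2, ih]
    · have h1 : findKthLoop (c :: rest) idx count k =
          (if count + 1 = k then idx else findKthLoop rest (idx + 1) (count + 1) k) := by
        simp [findKthLoop, hc]
      have h2 : pvPos (c :: rest) idx = idx :: pvPos rest (idx + 1) := by simp [pvPos, hc]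
      rw [h1, h2]
      have hl : (((idx :: pvPos rest (idx + 1)).length : Nat) : Int)
          = ((pvPos rest (idx + 1)).length : Int) + 1 := by push_cast [List.length_cons]; ring
      by_cases hk : count + 1 = k
      · have ht : (k - count - 1).toNat = 0 := by omega
        rw [if_pos hk, if_pos (by rw [hl]; omega), ht]
        simp [List.getD]
      · rw [if_neg hk, ih]
        by_cases hb : 1 ≤ k - (count + 1) ∧ k - (count + 1) ≤ ((pvPos rest (idx + 1)).length : Int)
        · rw [if_pos hb, if_pos (by rw [hl]; omega)]
          have hpos : (k - count - 1).toNat = ((k - (count + 1) - 1).toNat) + 1 := by omega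
          rw [hpos]
          simp [List.getD]
        · rw [if_neg hb, if_neg (by rw [hl]; omega)]

theorem find_kth_non_dash_spec : Claim_equal_find_kth_non_dash := by
  intro s k _
  unfold Spec_find_kth_non_dash find_kth_non_dash find_kth_non_dash_alt
  rw [pvPos_eq_filterMap]
  by_cases hk : k = -1
  · rw [if_pos hk]
    rw [if_neg (by omega)]
  · rw [if_neg hk, findKthLoop_eq]
    norm_num
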